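-- pv_equiv track=rewrite | github.com/ieeta-pt/HYMET | bench/plot/make_figures.py | order_tools
-- ===== SOURCE A (Python) =====
-- PREFERRED_TOOL_ORDER = [
--     "hymet",
--     "kraken2",
--     "centrifuge",
--     "ganon2",
--     "metaphlan4",
--     "sourmash_gather",
--     "camitax",
--     "basta",
--     "phabox",
--     "phyloflash",
--     "viwrap",
--     "squeezemeta",
-- ]
--
-- def order_tools(tools):
--     ordered = []
--     seen = set()
--     for tool in PREFERRED_TOOL_ORDER:
--         if tool in tools and tool not in seen:
--             ordered.append(tool)
--             seen.add(tool)
--     for tool in tools: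
--         if tool not in seen:
--             ordered.append(tool)
--             seen.add(tool)
--     return ordered
-- ===== SOURCE B (Python) =====
-- PREFERRED_TOOL_ORDER = [
--     "hymet",
--     "kraken2",
--     "centrifuge",
--     "ganon2",
--     "metaphlan4",
--     "sourmash_gather",
--     "camitax",
--     "basta",
--     "phabox",
--     "phyloflash",
--     "viwrap",
--     "squeezemeta",
-- ]
--
--
-- def _rank(tool):
--     # Rank = position in the preference list; unknown tools rank after all of them.
--     try:
--         return PREFERRED_TOOL_ORDER.index(tool)
--     except ValueError:
--         return len(PREFERRED_TOOL_ORDER)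
--
--
-- def order_tools(tools):
--     # One stable sort of the order-preserving deduplication by preference rank:
--     # preferred tools come out in list order, the rest keep their input order.
--     return sorted(dict.fromkeys(tools), key=_rank)
-- ===== Notes on version B (the rewrite author's own statement) =====
-- stated objective: simpler
-- what changed: Replaces A's two accumulator loops threading a shared mutable 'seen' set with a single stable sort of the order-preserving deduplication, keyed by each tool's rank in the preference list (unknown tools rank last, so stability keeps their input order).
import Mathlib
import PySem

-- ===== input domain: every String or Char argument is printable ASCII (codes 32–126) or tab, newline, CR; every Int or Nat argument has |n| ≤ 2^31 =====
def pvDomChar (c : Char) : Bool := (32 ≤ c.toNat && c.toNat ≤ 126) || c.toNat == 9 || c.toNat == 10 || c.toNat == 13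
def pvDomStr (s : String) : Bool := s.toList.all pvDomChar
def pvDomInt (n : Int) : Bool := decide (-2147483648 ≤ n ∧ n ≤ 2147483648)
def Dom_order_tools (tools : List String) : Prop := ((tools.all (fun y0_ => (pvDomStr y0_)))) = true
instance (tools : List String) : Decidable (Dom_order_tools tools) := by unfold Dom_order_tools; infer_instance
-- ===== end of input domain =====

-- B replaces A's two membership-scanning accumulator loops by ONE stable sort of the
-- order-preserving deduplication, keyed by preference rank; objective: simpler, same cost.

def PREFERRED_TOOL_ORDER : List String :=
  ["hymet", "kraken2", "centrifuge", "ganon2", "metaphlan4", "sourmash_gather",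
   "camitax", "basta", "phabox", "phyloflash", "viwrap", "squeezemeta"]

-- ===== PORT A =====
def order_tools (tools : List String) : List String :=
  let st1 := PREFERRED_TOOL_ORDER.foldl
    (fun (st : List String × PySem.Set String) tool =>
      if tools.contains tool && !(PySem.Set.contains st.2 tool) then
        (st.1 ++ [tool], PySem.Set.add st.2 tool)
      else st)
    ([], PySem.Set.empty)
  let st2 := tools.foldl
    (fun (st : List String × PySem.Set String) tool =>
      if !(PySem.Set.contains st.2 tool) then
        (st.1 ++ [tool], PySem.Set.add st.2 tool)
      else st)
    st1
  st2.1

-- ===== PORT B =====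
-- _rank: PREFERRED_TOOL_ORDER.index(tool), or len(PREFERRED_TOOL_ORDER) on ValueError
def pyRank (tool : String) : Int :=
  match PySem.List.index? PREFERRED_TOOL_ORDER tool with
  | some k => (k : Int)
  | none => (PREFERRED_TOOL_ORDER.length : Int)

def order_tools_alt (tools : List String) : List String :=
  PySem.List.sorted (PySem.List.dedup tools) pyRank

-- ===== PRECONDITION & SPEC =====
def Spec_order_tools (tools : List String) (out : List String) : Prop := out = order_tools_alt tools
instance (tools : List String) (out : List String) : Decidable (Spec_order_tools tools out) := by unfold Spec_order_tools; infer_instance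

-- ===== CLAIM (what is proved, stated in full; the proofs are below) =====
def Claim_equal_order_tools : Prop := ∀ (tools : List String), Dom_order_tools tools → Spec_order_tools tools (order_tools tools)

-- ===== LEMMAS AND PROOFS =====

-- ---- A-side characterisation: order_tools tools = P ++ others ----

-- first occurrences of ts, in order, skipping elements already in s (spec of A's second loop)
def fNew (s : List String) : List String → List String
  | [] => []
  | t :: ts => if t ∈ s then fNew s ts else t :: fNew (s ++ [t]) ts

theorem fNew_congr (ts : List String) : ∀ (s s' : List String),
    (∀ x, x ∈ s ↔ x ∈ s') → fNew s ts = fNew s' ts := by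
  induction ts with
  | nil => intro s s' _; rfl
  | cons t ts ih =>
    intro s s' h
    simp only [fNew]
    by_cases ht : t ∈ s
    · rw [if_pos ht, if_pos ((h t).mp ht)]; exact ih s s' h
    · rw [if_neg ht, if_neg (fun hc => ht ((h t).mpr hc))]
      exact congrArg (t :: ·) (ih (s ++ [t]) (s' ++ [t]) (by intro x; simp [h x]))

theorem fNew_append (ts : List String) : ∀ (s r : List String),
    fNew (s ++ r) ts = (fNew r ts).filter (fun t => !(s.contains t)) := by
  induction ts with
  | nil => intro s r; rfl
  | cons t ts ih =>
    intro s r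
    simp only [fNew, List.mem_append]
    by_cases hr : t ∈ r
    · rw [if_pos (Or.inr hr), if_pos hr]; exact ih s r
    · by_cases hs : t ∈ s
      · rw [if_pos (Or.inl hs), if_neg hr,
          List.filter_cons_of_neg (by simp [List.contains_eq_mem, hs])]
        rw [fNew_congr ts (s ++ r) (s ++ (r ++ [t])) (by
          intro x
          simp only [List.mem_append, List.mem_singleton]
          constructor
          · tauto
          · rintro (h | h | rfl)
            exacts [Or.inl h, Or.inr h, Or.inl hs])]
        exact ih s (r ++ [t])
      · rw [if_neg (by tauto), if_neg hr,
          List.filter_cons_of_pos (by simp [List.contains_eq_mem, hs])]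
        rw [List.append_assoc s r [t]]
        exact congrArg (t :: ·) (ih s (r ++ [t]))

theorem foldl_add_eq (ts : List String) : ∀ (s : PySem.Set String),
    ts.foldl PySem.Set.add s = s ++ fNew s ts := by
  induction ts with
  | nil => intro s; simp [fNew]
  | cons t ts ih =>
    intro s
    simp only [List.foldl_cons, fNew]
    by_cases ht : t ∈ s
    · rw [if_pos ht]
      have h : PySem.Set.add s t = s := by
        simp [PySem.Set.add, PySem.Set.contains, ht]
      rw [h, ih]
    · rw [if_neg ht]
      have h : PySem.Set.add s t = s ++ [t] := by
        simp [PySem.Set.add, PySem.Set.contains, ht]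
      rw [h, ih]; simp

theorem loop2_spec (ts : List String) : ∀ (acc : List String) (s : PySem.Set String),
    ts.foldl (fun (st : List String × PySem.Set String) tool =>
        if !(PySem.Set.contains st.2 tool) then
          (st.1 ++ [tool], PySem.Set.add st.2 tool)
        else st) (acc, s)
      = (acc ++ fNew s ts, s ++ fNew s ts) := by
  induction ts with
  | nil => intro acc s; simp [fNew]
  | cons t ts ih =>
    intro acc s
    simp only [List.foldl_cons, fNew]
    by_cases ht : t ∈ s
    · have hc : PySem.Set.contains s t = true := by
        simp [PySem.Set.contains, ht]
      rw [if_pos ht]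
      simp only [hc, Bool.not_true]
      rw [if_neg Bool.false_ne_true]
      exact ih acc s
    · have hc : PySem.Set.contains s t = false := by
        simp [PySem.Set.contains, ht]
      have hadd : PySem.Set.add s t = s ++ [t] := by
        simp [PySem.Set.add, PySem.Set.contains, ht]
      rw [if_neg ht, if_pos (by simp [PySem.Set.contains, ht]), hadd, ih]
      simp

theorem loop1_spec (tools : List String) (l : List String) : ∀ (acc : List String) (s : PySem.Set String),
    l.Nodup → (∀ t ∈ l, t ∉ s) →
    l.foldl (fun (st : List String × PySem.Set String) tool =>
        if tools.contains tool && !(PySem.Set.contains st.2 tool) then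
          (st.1 ++ [tool], PySem.Set.add st.2 tool)
        else st) (acc, s)
      = (acc ++ l.filter (fun t => tools.contains t),
         s ++ l.filter (fun t => tools.contains t)) := by
  induction l with
  | nil => intro acc s _ _; simp
  | cons t l ih =>
    intro acc s hnd hns
    have hts : t ∉ s := hns t (by simp)
    have hc : PySem.Set.contains s t = false := by
      simp [PySem.Set.contains, hts]
    have hnd' : l.Nodup := (List.nodup_cons.mp hnd).2
    have htl : t ∉ l := (List.nodup_cons.mp hnd).1
    simp only [List.foldl_cons]
    by_cases hin : tools.contains t = true
    · have hmem : t ∈ tools := by simpa [List.contains_eq_mem] using hin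
      have hadd : PySem.Set.add s t = s ++ [t] := by
        simp [PySem.Set.add, PySem.Set.contains, hts]
      rw [if_pos (by rw [hin, hc]; rfl), hadd,
        ih (acc ++ [t]) (s ++ [t]) hnd' (by
          intro u hu
          simp only [List.mem_append, List.mem_singleton]
          rintro (h | rfl)
          · exact hns u (List.mem_cons_of_mem t hu) h
          · exact htl hu),
        List.filter_cons_of_pos hin]
      simp only [List.append_assoc, List.singleton_append]
    · simp only [Bool.not_eq_true] at hin
      have hmem : t ∉ tools := by simpa [List.contains_eq_mem] using hin
      rw [if_neg (by simp [hmem]), List.filter_cons_of_neg (by simp [hmem])]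
      exact ih acc s hnd' (fun u hu => hns u (List.mem_cons_of_mem t hu))

theorem preferred_nodup : PREFERRED_TOOL_ORDER.Nodup := by decide

-- order_tools tools = preferred-present ++ deduped-others
theorem order_tools_eq (tools : List String) :
    order_tools tools
      = PREFERRED_TOOL_ORDER.filter (fun t => tools.contains t)
        ++ (PySem.List.dedup tools).filter (fun t => !(PREFERRED_TOOL_ORDER.contains t)) := by
  unfold order_tools
  have h1 := loop1_spec tools PREFERRED_TOOL_ORDER [] (PySem.Set.empty)
    preferred_nodup (by intro t _; simp [PySem.Set.empty])
  simp only [h1]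
  set P := PREFERRED_TOOL_ORDER.filter (fun t => tools.contains t) with hP
  have hPempty : (PySem.Set.empty : PySem.Set String) ++ P = P := by
    simp [PySem.Set.empty]
  rw [hPempty, loop2_spec tools ([] ++ P) P]
  simp only [List.nil_append]
  have hmemP : ∀ x, x ∈ P ↔ x ∈ tools ∧ x ∈ PREFERRED_TOOL_ORDER := by
    intro x; rw [hP]; simp [List.mem_filter, List.contains_eq_mem]; tauto
  have hsec : fNew P tools
      = (PySem.List.dedup tools).filter (fun t => !(PREFERRED_TOOL_ORDER.contains t)) := by
    have h0 : fNew ([] : List String) tools = PySem.List.dedup tools := by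
      have h := foldl_add_eq tools []
      rw [PySem.List.dedup_eq_ofList, PySem.Set.ofList_eq_foldl, h]
      simp
    have h2 : fNew (P ++ []) tools
        = (fNew ([] : List String) tools).filter (fun t => !(P.contains t)) :=
      fNew_append tools P []
    rw [List.append_nil] at h2
    rw [h2, h0]
    apply List.filter_congr
    intro t ht
    have httools : t ∈ tools := (PySem.List.mem_dedup tools t).mp ht
    simp only [List.contains_eq_mem]
    have hiff : t ∈ P ↔ t ∈ PREFERRED_TOOL_ORDER := by
      rw [hmemP t]; tauto
    by_cases hp : t ∈ PREFERRED_TOOL_ORDER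
    · simp [hp, hiff.mpr hp]
    · have hnp : t ∉ P := fun h => hp (hiff.mp h)
      simp [hp, hnp]
  rw [hsec]

-- ---- B-side: the stable sort splits into the <M bucket sorted, then the =M bucket ----

theorem insertBy_append_of_before {α : Type} (before : α → α → Bool) (x : α)
    (lo hi : List α) (h : ∀ y ∈ hi, before x y = true) :
    PySem.List.insertBy before x (lo ++ hi) = PySem.List.insertBy before x lo ++ hi := by
  induction lo with
  | nil =>
    cases hi with
    | nil => rfl
    | cons y ys =>
      simp only [List.nil_append, PySem.List.insertBy, h y (by simp)]
      rfl
  | cons z lo ih =>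
    simp only [List.cons_append, PySem.List.insertBy]
    by_cases hz : before x z = true
    · simp [hz]
    · simp only [Bool.not_eq_true] at hz
      simp [hz, ih]

theorem sorted_snoc {α κ : Type} [LinearOrder κ] (xs : List α) (x : α) (key : α → κ) :
    PySem.List.sorted (xs ++ [x]) key
      = PySem.List.insertBy (fun a b => decide (key a < key b)) x (PySem.List.sorted xs key) := by
  rw [PySem.List.sorted_eq_foldl_insertBy, PySem.List.sorted_eq_foldl_insertBy,
    List.foldl_append]
  rfl

-- stable bucket split at the maximal key M
theorem sorted_bucket {α : Type} (key : α → Int) (M : Int) (xs : List α)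
    (hle : ∀ x ∈ xs, key x ≤ M) :
    PySem.List.sorted xs key
      = PySem.List.sorted (xs.filter (fun x => decide (key x < M))) key
        ++ xs.filter (fun x => decide (key x = M)) := by
  induction xs using List.reverseRecOn with
  | nil => rfl
  | append_singleton xs x ih =>
    have hle' : ∀ y ∈ xs, key y ≤ M := fun y hy => hle y (by simp [hy])
    have hx : key x ≤ M := hle x (by simp)
    rw [sorted_snoc, ih hle']
    by_cases hlt : key x < M
    · have hhi : ∀ y ∈ xs.filter (fun x => decide (key x = M)),
          (fun a b => decide (key a < key b)) x y = true := by
        intro y hy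
        have : key y = M := by simpa using (List.mem_filter.mp hy).2
        simp [this, hlt]
      rw [insertBy_append_of_before _ _ _ _ hhi, ← sorted_snoc]
      have hf1 : (xs ++ [x]).filter (fun x => decide (key x < M))
          = xs.filter (fun x => decide (key x < M)) ++ [x] := by
        simp [List.filter_append, hlt]
      have hf2 : (xs ++ [x]).filter (fun x => decide (key x = M))
          = xs.filter (fun x => decide (key x = M)) := by
        simp [List.filter_append]
        omega
      rw [hf1, hf2]
    · have hxM : key x = M := by omega
      have hnb : ∀ y ∈ PySem.List.sorted (xs.filter (fun x => decide (key x < M))) key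
            ++ xs.filter (fun x => decide (key x = M)),
          (fun a b => decide (key a < key b)) x y = false := by
        intro y hy
        rcases List.mem_append.mp hy with hy | hy
        · have hy' := (PySem.List.mem_sorted _ _ _ _).mp hy
          have : key y < M := by simpa using (List.mem_filter.mp hy').2
          simp; omega
        · have : key y = M := by simpa using (List.mem_filter.mp hy).2
          simp; omega
      rw [PySem.List.insertBy_of_forall_not_before _ _ _ hnb]
      have hf1 : (xs ++ [x]).filter (fun x => decide (key x < M))
          = xs.filter (fun x => decide (key x < M)) := by
        simp [List.filter_append, hlt]
      have hf2 : (xs ++ [x]).filter (fun x => decide (key x = M))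
          = xs.filter (fun x => decide (key x = M)) ++ [x] := by
        simp [List.filter_append, hxM]
      rw [hf1, hf2, List.append_assoc]

-- ---- facts about the rank key ----

theorem pyRank_le (t : String) : pyRank t ≤ 12 := by
  unfold pyRank
  cases hidx : PySem.List.index? PREFERRED_TOOL_ORDER t with
  | none => simp [PREFERRED_TOOL_ORDER]
  | some k =>
    obtain ⟨pre, suf, heq, hlen, -⟩ :=
      (PySem.List.index?_eq_some_iff PREFERRED_TOOL_ORDER t k).mp hidx
    have h12 : PREFERRED_TOOL_ORDER.length = 12 := by decide
    rw [heq] at h12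
    simp only [List.length_append, List.length_cons] at h12
    show (k : Int) ≤ 12
    omega

theorem pyRank_of_mem : ∀ t ∈ PREFERRED_TOOL_ORDER, pyRank t < 12 := by decide

theorem pyRank_of_not_mem (t : String) (h : t ∉ PREFERRED_TOOL_ORDER) : pyRank t = 12 := by
  unfold pyRank
  cases hidx : PySem.List.index? PREFERRED_TOOL_ORDER t with
  | none => simp [PREFERRED_TOOL_ORDER]
  | some k =>
    obtain ⟨pre, suf, heq, -, -⟩ :=
      (PySem.List.index?_eq_some_iff PREFERRED_TOOL_ORDER t k).mp hidx
    exact absurd (by rw [heq]; simp) h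

theorem pyRank_pairwise : PREFERRED_TOOL_ORDER.Pairwise (fun a b => pyRank a < pyRank b) := by
  decide

-- ===== VERDICT (by name: the statement is the Claim_ definition above) =====
theorem order_tools_spec : Claim_equal_order_tools := by
  intro tools _
  unfold Spec_order_tools order_tools_alt
  rw [order_tools_eq]
  have hd := PySem.List.nodup_dedup tools
  rw [sorted_bucket pyRank 12 (PySem.List.dedup tools)
    (fun x _ => pyRank_le x)]
  congr 1
  · -- sorted low bucket = preferred filter
    apply (PySem.List.sorted_eq_of_perm_of_pairwise_lt _ _ _ _ _).symm
    · rw [List.perm_ext_iff_of_nodup (preferred_nodup.filter _) (hd.filter _)]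
      intro t
      simp only [List.mem_filter, PySem.List.mem_dedup, List.contains_eq_mem,
        decide_eq_true_eq]
      constructor
      · rintro ⟨hp, ht⟩
        exact ⟨by simpa using ht, pyRank_of_mem t hp⟩
      · rintro ⟨ht, hr⟩
        refine ⟨?_, by simpa using ht⟩
        by_contra hnp
        rw [pyRank_of_not_mem t hnp] at hr
        omega
    · exact pyRank_pairwise.sublist List.filter_sublist
  · -- high bucket = non-preferred filter
    apply List.filter_congr
    intro t _
    by_cases hp : t ∈ PREFERRED_TOOL_ORDER
    · have := pyRank_of_mem t hp
      simp [List.contains_eq_mem, hp]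
      omega
    · simp [List.contains_eq_mem, hp, pyRank_of_not_mem t hp]
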